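-- pv_equiv track=rewrite | github.com/s23deepak/MedGemma | src/soap/generator.py | _format_html_content
-- ===== SOURCE A (Python) =====
-- def _format_html_content(text: str) -> str:
--     """Format text content for HTML display."""
--     lines = text.split("\n")
--     formatted_lines = []
--     in_list = False
--
--     for line in lines:
--         stripped = line.strip()
--         if stripped.startswith("- ") or stripped.startswith("* "):
--             if not in_list:
--                 formatted_lines.append("<ul>")
--                 in_list = True
--             formatted_lines.append(f"<li>{stripped[2:]}</li>")
--         else:
--             if in_list:
--                 formatted_lines.append("</ul>")
--                 in_list = False
--             if stripped:
--                 formatted_lines.append(f"<p>{stripped}</p>")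
--
--     if in_list:
--         formatted_lines.append("</ul>")
--
--     return "\n".join(formatted_lines)
-- ===== SOURCE B (Python) =====
-- def _format_html_content(text: str) -> str:
--     """Format text content for HTML display (run-based: consume maximal list runs)."""
--     lines = [l.strip() for l in text.split("\n")]
--     def is_item(s):
--         return s.startswith(("- ", "* "))
--     out = []
--     i = 0
--     n = len(lines)
--     while i < n:
--         s = lines[i]
--         if is_item(s):
--             out.append("<ul>")
--             while i < n and is_item(lines[i]):
--                 out.append(f"<li>{lines[i][2:]}</li>")
--                 i += 1
--             out.append("</ul>")
--         else:
--             if s: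
--                 out.append(f"<p>{s}</p>")
--             i += 1
--     return "\n".join(out)
-- ===== Notes on version B (the rewrite author's own statement) =====
-- stated objective: alternative
-- what changed: Replaces A's in_list flag toggle with a run-based structure: strip all lines once, then consume each maximal run of list lines with an inner loop emitting a whole <ul>...</ul> block, and single non-list lines otherwise.
import Mathlib
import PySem

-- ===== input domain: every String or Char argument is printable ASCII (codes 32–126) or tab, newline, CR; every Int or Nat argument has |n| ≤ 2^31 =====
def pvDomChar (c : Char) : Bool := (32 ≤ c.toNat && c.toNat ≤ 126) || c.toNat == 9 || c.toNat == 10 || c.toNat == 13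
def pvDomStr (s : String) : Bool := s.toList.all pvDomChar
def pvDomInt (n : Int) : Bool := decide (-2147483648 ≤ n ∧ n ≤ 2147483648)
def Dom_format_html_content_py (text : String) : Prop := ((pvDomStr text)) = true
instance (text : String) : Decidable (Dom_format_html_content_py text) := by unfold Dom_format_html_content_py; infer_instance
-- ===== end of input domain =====

-- B replaces A's in_list flag with a run-based decomposition (strip all lines, then emit whole <ul> blocks per maximal run of list lines); alternative structure, same cost.


-- ===== PORT A =====
-- loop body of A (one line, state = (formatted_lines, in_list))
def fhcStepA (st : List String × Bool) (line : String) : List String × Bool :=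
  let stripped := PySem.Str.strip line
  if PySem.Str.startswith stripped "- " || PySem.Str.startswith stripped "* " then
    let st' := if st.2 then st else (st.1 ++ ["<ul>"], true)
    (st'.1 ++ ["<li>" ++ PySem.Str.slice stripped (some 2) none ++ "</li>"], st'.2)
  else
    let st' := if st.2 then (st.1 ++ ["</ul>"], false) else st
    if stripped ≠ "" then (st'.1 ++ ["<p>" ++ stripped ++ "</p>"], st'.2) else st'

def format_html_content_py (text : String) : String :=
  let lines := ((PySem.Str.split? text "\n").getD [])
  let r := lines.foldl fhcStepA ([], false)
  let formatted := if r.2 then r.1 ++ ["</ul>"] else r.1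
  PySem.Str.join "\n" formatted

-- ===== PORT B =====
def fhcIsItem (s : String) : Bool :=
  PySem.Str.startswith s "- " || PySem.Str.startswith s "* "

def fhcLi (s : String) : String := "<li>" ++ PySem.Str.slice s (some 2) none ++ "</li>"

-- B's outer while loop over already-stripped lines; the inner while loop over a
-- maximal run of list lines is the takeWhile/dropWhile pair.
def fhcRender : List String → List String
  | [] => []
  | s :: ss =>
    if fhcIsItem s then
      "<ul>" :: fhcLi s :: (ss.takeWhile fhcIsItem).map fhcLi
        ++ "</ul>" :: fhcRender (ss.dropWhile fhcIsItem)
    else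
      (if s ≠ "" then ["<p>" ++ s ++ "</p>"] else []) ++ fhcRender ss
termination_by ls => ls.length
decreasing_by
  · exact Nat.lt_succ_of_le (List.length_dropWhile_le _ _)
  · simp

def format_html_content_py_alt (text : String) : String :=
  PySem.Str.join "\n" (fhcRender ((((PySem.Str.split? text "\n").getD [])).map PySem.Str.strip))

-- ===== PRECONDITION & SPEC =====
def Spec_format_html_content_py (text : String) (out : String) : Prop := out = format_html_content_py_alt text
instance (text : String) (out : String) : Decidable (Spec_format_html_content_py text out) := by unfold Spec_format_html_content_py; infer_instance

-- ===== CLAIM (what is proved, stated in full; the proofs are below) =====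
def Claim_equal_format_html_content_py : Prop := ∀ (text : String), Dom_format_html_content_py text → Spec_format_html_content_py text (format_html_content_py text)

-- ===== LEMMAS AND PROOFS =====

-- A's loop as a pure suffix function: fhcLoopA lines b = the lines A's loop (plus the
-- final close) appends when started in state in_list = b.
def fhcLoopA : List String → Bool → List String
  | [], b => if b then ["</ul>"] else []
  | l :: ls, b =>
    let s := PySem.Str.strip l
    if fhcIsItem s then
      (if b then [] else ["<ul>"]) ++ fhcLi s :: fhcLoopA ls true
    else
      (if b then ["</ul>"] else []) ++ (if s ≠ "" then ["<p>" ++ s ++ "</p>"] else [])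
        ++ fhcLoopA ls false

theorem fhcFoldA (lines : List String) : ∀ (acc : List String) (b : Bool),
    (if (lines.foldl fhcStepA (acc, b)).2
      then (lines.foldl fhcStepA (acc, b)).1 ++ ["</ul>"]
      else (lines.foldl fhcStepA (acc, b)).1) = acc ++ fhcLoopA lines b := by
  induction lines with
  | nil => intro acc b; cases b <;> simp [fhcLoopA]
  | cons l ls ih =>
    intro acc b
    rw [List.foldl_cons]
    by_cases h : fhcIsItem (PySem.Str.strip l)
    · have hc := h
      simp [fhcIsItem] at hc
      have hs : fhcStepA (acc, b) l
          = ((if b then acc else acc ++ ["<ul>"]) ++ [fhcLi (PySem.Str.strip l)], true) := by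
        rcases hc with hc | hc <;> cases b <;> simp [fhcStepA, fhcLi, hc]
      rw [hs, ih]
      cases b <;> simp [fhcLoopA, h]
    · have hc := h
      simp [fhcIsItem] at hc
      have hs : fhcStepA (acc, b) l
          = ((if b then acc ++ ["</ul>"] else acc) ++
              (if PySem.Str.strip l ≠ "" then ["<p>" ++ PySem.Str.strip l ++ "</p>"] else []),
             false) := by
        cases b <;> by_cases he : PySem.Str.strip l = "" <;> simp [fhcStepA, hc, he] <;> try decide
      rw [hs, ih]
      cases b <;> by_cases he : PySem.Str.strip l = "" <;> simp [fhcLoopA, h, he, (by decide : fhcIsItem "" = false)]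

theorem fhcLoopA_render (ls : List String) :
    fhcLoopA ls false = fhcRender (ls.map PySem.Str.strip) ∧
    fhcLoopA ls true =
      ((ls.map PySem.Str.strip).takeWhile fhcIsItem).map fhcLi
        ++ "</ul>" :: fhcRender ((ls.map PySem.Str.strip).dropWhile fhcIsItem) := by
  induction ls with
  | nil => simp [fhcLoopA, fhcRender]
  | cons l ls ih =>
    by_cases h : fhcIsItem (PySem.Str.strip l)
    · constructor <;>
        simp [fhcLoopA, fhcRender, h, ih.2]
    · constructor <;>
        simp [fhcLoopA, fhcRender, h, ih.1]

-- ===== VERDICT (by name: the statement is the Claim_ definition above) =====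
theorem format_html_content_py_spec : Claim_equal_format_html_content_py := by
  intro text _
  unfold Spec_format_html_content_py format_html_content_py format_html_content_py_alt
  have h := fhcFoldA (((PySem.Str.split? text "\n").getD [])) [] false
  simp only [List.nil_append] at h
  simp only [h, (fhcLoopA_render (((PySem.Str.split? text "\n").getD []))).1]
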